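-- pv_equiv track=rewrite | github.com/BiniFn/Threadborn-Starting-Life-Beyond-the-Covenant-Door | scripts/build_jp_md.py | extract_template_literals
-- ===== SOURCE A (Python) =====
-- def extract_template_literals(js_block):
--     results = []
--     i = 0
--     while i < len(js_block):
--         if js_block[i] == '`':
--             j = i + 1
--             while j < len(js_block):
--                 if js_block[j] == '\\':
--                     j += 2
--                 elif js_block[j] == '`':
--                     results.append(js_block[i+1:j])
--                     i = j + 1
--                     break
--                 else:
--                     j += 1
--             else:
--                 break
--         else:
--             i += 1
--     return results
-- ===== SOURCE B (Python) =====
-- def extract_template_literals(js_block):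
--     # Single pass character-by-character state machine instead of nested
--     # index loops with slicing: buf is None outside a literal, else the
--     # chars collected so far; esc marks a pending backslash escape.
--     results = []
--     buf = None
--     esc = False
--     for ch in js_block:
--         if buf is None:
--             if ch == '`':
--                 buf = []
--         elif esc:
--             buf.append(ch)
--             esc = False
--         elif ch == '\\':
--             buf.append(ch)
--             esc = True
--         elif ch == '`':
--             results.append(''.join(buf))
--             buf = None
--         else:
--             buf.append(ch)
--     return results
-- ===== Notes on version B (the rewrite author's own statement) =====
-- stated objective: alternative
-- what changed: Replaced the nested index-based while loops with slicing by a single left-to-right character state machine (outside / inside-buffer / escape-pending) that accumulates each literal's characters as it goes.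
import Mathlib
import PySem

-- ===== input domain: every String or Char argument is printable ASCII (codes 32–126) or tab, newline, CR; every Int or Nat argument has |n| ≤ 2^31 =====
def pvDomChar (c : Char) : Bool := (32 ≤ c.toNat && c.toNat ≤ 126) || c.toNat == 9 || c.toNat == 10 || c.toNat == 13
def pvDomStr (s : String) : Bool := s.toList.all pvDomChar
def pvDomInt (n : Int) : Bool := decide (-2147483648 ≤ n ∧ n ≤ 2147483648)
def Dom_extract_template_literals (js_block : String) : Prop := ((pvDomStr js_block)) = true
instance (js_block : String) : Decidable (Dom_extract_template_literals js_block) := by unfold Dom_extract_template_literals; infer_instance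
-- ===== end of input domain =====

-- B replaces A's nested index loops + slicing by a single-pass character state machine
-- (alternative decomposition, same O(n) cost); return values agree on all inputs.

-- ===== PORT A =====
-- inner 'while j < len' loop of A: returns the index of the closing backtick, none = unterminated
def pvInner (cs : List Char) (j : Nat) : Option Nat :=
  if h : j < cs.length then
    if cs[j] = '\\' then pvInner cs (j + 2)
    else if cs[j] = '`' then some j
    else pvInner cs (j + 1)
  else none
termination_by cs.length - j
decreasing_by
  · exact Nat.sub_lt_sub_left h (Nat.lt_add_of_pos_right (by exact Nat.zero_lt_two))
  · exact Nat.sub_lt_sub_left h (Nat.lt_succ_self j)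

-- needed (by name) for pvOuter's termination
theorem pvInner_bounds (cs : List Char) (j k : Nat) (h : pvInner cs j = some k) :
    j ≤ k ∧ k < cs.length := by
  have H : ∀ n j k, cs.length - j ≤ n → pvInner cs j = some k → j ≤ k ∧ k < cs.length := by
    intro n
    induction n with
    | zero =>
      intro j k hn h
      rw [pvInner, dif_neg (by omega : ¬ j < cs.length)] at h
      cases h
    | succ n ih =>
      intro j k hn h
      by_cases hj : j < cs.length
      · rw [pvInner, dif_pos hj] at h
        by_cases hb : cs[j] = '\\'
        · rw [if_pos hb] at h
          have := ih (j + 2) k (by omega) h; omega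
        · rw [if_neg hb] at h
          by_cases ht : cs[j] = '`'
          · rw [if_pos ht] at h; cases h; omega
          · rw [if_neg ht] at h
            have := ih (j + 1) k (by omega) h; omega
      · rw [pvInner, dif_neg hj] at h; cases h
  exact H cs.length j k (by omega) h

-- outer 'while i < len' loop of A; js_block[i+1:j] is ported as drop/take, exact since 0 ≤ i+1 ≤ j ≤ len here
def pvOuter (cs : List Char) (results : List String) (i : Nat) : List String :=
  if h : i < cs.length then
    if cs[i] = '`' then
      match hk : pvInner cs (i + 1) with
      | some k => pvOuter cs (results ++ [String.ofList ((cs.drop (i + 1)).take (k - (i + 1)))]) (k + 1)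
      | none => results
    else pvOuter cs results (i + 1)
  else results
termination_by cs.length - i
decreasing_by
  · exact Nat.sub_lt_sub_left h (Nat.lt_succ_of_lt (Nat.lt_of_succ_le (pvInner_bounds cs (i + 1) k hk).1))
  · exact Nat.sub_lt_sub_left h (Nat.lt_succ_self i)

def extract_template_literals (js_block : String) : List String :=
  pvOuter js_block.toList [] 0

-- ===== PORT B =====
-- one step of Source B's for-loop: state = (results, buf (none = outside a literal), esc)
def pvStep (st : List String × Option (List Char) × Bool) (ch : Char) :
    List String × Option (List Char) × Bool :=
  match st with
  | (results, none, _) => if ch = '`' then (results, some [], false) else (results, none, false)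
  | (results, some buf, true) => (results, some (buf ++ [ch]), false)
  | (results, some buf, false) =>
    if ch = '\\' then (results, some (buf ++ [ch]), true)
    else if ch = '`' then (results ++ [String.ofList buf], none, false)
    else (results, some (buf ++ [ch]), false)

def extract_template_literals_alt (js_block : String) : List String :=
  (js_block.toList.foldl pvStep ([], none, false)).1

-- ===== PRECONDITION & SPEC =====
def Spec_extract_template_literals (js_block : String) (out : List String) : Prop := out = extract_template_literals_alt js_block
instance (js_block : String) (out : List String) : Decidable (Spec_extract_template_literals js_block out) := by unfold Spec_extract_template_literals; infer_instance

-- ===== CLAIM (what is proved, stated in full; the proofs are below) =====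
def Claim_equal_extract_template_literals : Prop := ∀ (js_block : String), Dom_extract_template_literals js_block → Spec_extract_template_literals js_block (extract_template_literals js_block)

-- ===== LEMMAS AND PROOFS =====

theorem pvDropCons (cs : List Char) (j : Nat) (h : j < cs.length) :
    cs.drop j = cs[j] :: cs.drop (j + 1) := by
  exact (List.getElem_cons_drop h).symm

-- B's fold from inside-literal state (buf, esc = false) at position j computes A's inner scan
theorem pvInside (cs : List Char) (n : Nat)
    (IH : ∀ i results, cs.length - i ≤ n →
      pvOuter cs results i = ((cs.drop i).foldl pvStep (results, none, false)).1) :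
    ∀ m j buf results, cs.length - j ≤ m → cs.length ≤ n + j + 1 →
      ((cs.drop j).foldl pvStep (results, some buf, false)).1 =
        match pvInner cs j with
        | some k => pvOuter cs (results ++ [String.ofList (buf ++ (cs.drop j).take (k - j))]) (k + 1)
        | none => results := by
  intro m
  induction m with
  | zero =>
    intro j buf results hm _
    have hj : ¬ j < cs.length := by omega
    rw [pvInner, dif_neg hj, List.drop_eq_nil_of_le (by omega)]
    simp
  | succ m ih =>
    intro j buf results hm hn
    by_cases hj : j < cs.length
    · rw [pvDropCons cs j hj, List.foldl_cons]
      by_cases hb : cs[j] = '\\'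
      · rw [show pvStep (results, some buf, false) cs[j] = (results, some (buf ++ [cs[j]]), true) from by
          simp [pvStep, hb]]
        by_cases hj1 : j + 1 < cs.length
        · have hinner : pvInner cs j = pvInner cs (j + 2) := by
            rw [pvInner, dif_pos hj, if_pos hb]
          rw [pvDropCons cs (j + 1) hj1, List.foldl_cons]
          rw [show pvStep (results, some (buf ++ [cs[j]]), true) cs[j+1]
              = (results, some (buf ++ [cs[j]] ++ [cs[j+1]]), false) from by simp [pvStep]]
          rw [ih (j + 2) (buf ++ [cs[j]] ++ [cs[j+1]]) results (by omega) (by omega), hinner]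
          cases hk : pvInner cs (j + 2) with
          | none => simp
          | some k =>
            have hkb := pvInner_bounds cs (j + 2) k hk
            have htake : (cs.drop j).take (k - j)
                = cs[j] :: cs[j+1] :: (cs.drop (j + 2)).take (k - (j + 2)) := by
              rw [pvDropCons cs j hj, pvDropCons cs (j + 1) hj1,
                show k - j = (k - (j + 1)) + 1 from by omega, List.take_succ_cons,
                show k - (j + 1) = (k - (j + 2)) + 1 from by omega, List.take_succ_cons]
            simp [htake]
        · -- escape runs off the end: B discards the open buffer; A's inner loop exhausts too
          have hinner : pvInner cs j = none := by
            rw [pvInner, dif_pos hj, if_pos hb, pvInner, dif_neg (by omega : ¬ j + 2 < cs.length)]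
          rw [hinner, List.drop_eq_nil_of_le (by omega)]
          simp
      · by_cases ht : cs[j] = '`'
        · have hinner : pvInner cs j = some j := by
            rw [pvInner, dif_pos hj, if_neg hb, if_pos ht]
          rw [show pvStep (results, some buf, false) cs[j] = (results ++ [String.ofList buf], none, false) from by
            simp [pvStep, ht]]
          rw [hinner, ← IH (j + 1) (results ++ [String.ofList buf]) (by omega)]
          simp
        · have hinner : pvInner cs j = pvInner cs (j + 1) := by
            rw [pvInner, dif_pos hj, if_neg hb, if_neg ht]
          rw [show pvStep (results, some buf, false) cs[j] = (results, some (buf ++ [cs[j]]), false) from by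
            simp [pvStep, hb, ht]]
          rw [ih (j + 1) (buf ++ [cs[j]]) results (by omega) (by omega), hinner]
          cases hk : pvInner cs (j + 1) with
          | none => simp
          | some k =>
            have hkb := pvInner_bounds cs (j + 1) k hk
            have htake : (cs.drop j).take (k - j)
                = cs[j] :: (cs.drop (j + 1)).take (k - (j + 1)) := by
              rw [pvDropCons cs j hj,
                show k - j = (k - (j + 1)) + 1 from by omega, List.take_succ_cons]
            simp [htake]
    · rw [pvInner, dif_neg hj, List.drop_eq_nil_of_le (by omega)]
      simp

-- B's fold from outside-literal state at position i computes A's outer loop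
theorem pvOutside (cs : List Char) :
    ∀ n i results, cs.length - i ≤ n →
      pvOuter cs results i = ((cs.drop i).foldl pvStep (results, none, false)).1 := by
  intro n
  induction n with
  | zero =>
    intro i results hn
    have hi : ¬ i < cs.length := by omega
    rw [pvOuter, dif_neg hi, List.drop_eq_nil_of_le (by omega)]
    simp
  | succ n ih =>
    intro i results hn
    by_cases hi : i < cs.length
    · rw [pvOuter, dif_pos hi]
      by_cases ht : cs[i] = '`'
      · rw [if_pos ht, pvDropCons cs i hi, List.foldl_cons]
        rw [show pvStep (results, none, false) cs[i] = (results, some [], false) from by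
          simp [pvStep, ht]]
        rw [pvInside cs n ih cs.length (i + 1) [] results (by omega) (by omega)]
        cases hk : pvInner cs (i + 1) with
        | none => simp
        | some k => simp
      · rw [if_neg ht, pvDropCons cs i hi, List.foldl_cons]
        rw [show pvStep (results, none, false) cs[i] = (results, none, false) from by
          simp [pvStep, ht]]
        exact ih (i + 1) results (by omega)
    · rw [pvOuter, dif_neg hi, List.drop_eq_nil_of_le (by omega)]
      simp

-- ===== VERDICT (by name: the statement is the Claim_ definition above) =====
theorem extract_template_literals_spec : Claim_equal_extract_template_literals := by
  intro js _
  unfold Spec_extract_template_literals extract_template_literals extract_template_literals_alt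
  have := pvOutside js.toList js.toList.length 0 [] (by omega)
  simpa using this
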